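-- pv_equiv track=rewrite | github.com/micklymchuk/parser-html | src/html_rag/analytics/trend_analyzer.py | _find_declining_topics
-- ===== SOURCE A (Python) =====
-- from typing import List, Dict, Any, Optional, Tuple
-- from collections import defaultdict, Counter
--
-- def _find_declining_topics(topic_evolution: List[Dict[str, int]]) -> List[str]:
--     """Find topics that are becoming less prominent."""
--     try:
--         if len(topic_evolution) < 3:
--             return []
--
--         declining = []
--         mid_point = len(topic_evolution) // 2
--
--         # Compare first half vs second half
--         first_half_topics = Counter()
--         second_half_topics = Counter()
--
--         for topics in topic_evolution[:mid_point]: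
--             for topic, count in topics.items():
--                 first_half_topics[topic] += count
--
--         for topics in topic_evolution[mid_point:]:
--             for topic, count in topics.items():
--                 second_half_topics[topic] += count
--
--         # Find topics that decreased significantly
--         for topic in first_half_topics:
--             first_count = first_half_topics[topic]
--             second_count = second_half_topics.get(topic, 0)
--
--             # Declining if appeared much less in second half
--             if first_count > second_count * 2 and first_count > 2:
--                 declining.append(topic)
--
--         return declining[:10]  # Top 10 declining topics
--
--     except Exception:
--         return []
-- ===== SOURCE B (Python) =====
-- def _find_declining_topics(topic_evolution):
--     """Find topics that are becoming less prominent."""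
--     if len(topic_evolution) < 3:
--         return []
--     mid = len(topic_evolution) // 2
--     first = topic_evolution[:mid]
--     second = topic_evolution[mid:]
--     declining = []
--     seen = set()
--     # per-topic direct scans instead of building count tables:
--     # visit first-half topics in first-appearance order; for each fresh topic
--     # total its counts in each half directly, stopping as soon as 10 are found.
--     for topics in first:
--         for topic in topics:
--             if topic in seen:
--                 continue
--             seen.add(topic)
--             f = sum(d.get(topic, 0) for d in first)
--             s = sum(d.get(topic, 0) for d in second)
--             if f > s * 2 and f > 2:
--                 declining.append(topic)
--                 if len(declining) == 10:
--                     return declining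
--     return declining
-- ===== Notes on version B (the rewrite author's own statement) =====
-- stated objective: alternative
-- what changed: B builds no count tables at all: instead of A's two Counter dicts plus a final key loop, it walks first-half topics in first-appearance order with a seen-set, totals each fresh topic's counts by direct scans over the two halves, and returns early the moment 10 declining topics are collected (no trailing slice).
import Mathlib
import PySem

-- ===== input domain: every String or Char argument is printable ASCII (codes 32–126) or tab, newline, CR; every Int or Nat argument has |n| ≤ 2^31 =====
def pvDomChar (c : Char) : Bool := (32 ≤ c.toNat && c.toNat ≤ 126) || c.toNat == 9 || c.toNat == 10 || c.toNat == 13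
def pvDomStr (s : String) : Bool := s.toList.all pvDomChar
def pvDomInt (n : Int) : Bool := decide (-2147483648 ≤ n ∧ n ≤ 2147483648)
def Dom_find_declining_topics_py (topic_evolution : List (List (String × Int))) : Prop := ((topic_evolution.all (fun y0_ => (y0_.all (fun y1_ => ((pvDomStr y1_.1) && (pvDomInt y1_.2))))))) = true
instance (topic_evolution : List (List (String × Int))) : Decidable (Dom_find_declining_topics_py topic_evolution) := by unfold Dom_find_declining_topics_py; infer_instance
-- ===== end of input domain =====

-- B drops A's Counter tables entirely: it visits first-half topics in first-appearance order
-- (a seen set), sums each fresh topic's counts by direct scans over the two halves, and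
-- returns early once 10 declining topics are found (objective: alternative; a timing run measured B faster on its inputs).

-- ===== PORT A =====
def find_declining_topics_py (topic_evolution : List (List (String × Int))) : List String :=
  if topic_evolution.length < 3 then []
  else
    let mid_point : Int := PySem.Int.floordiv topic_evolution.length 2
    let first_half_topics : PySem.Dict String Int :=
      (PySem.List.slice topic_evolution none (some mid_point)).foldl
        (fun d topics => topics.foldl (fun d p => PySem.Dict.modify d p.1 0 (· + p.2)) d)
        PySem.Dict.empty
    let second_half_topics : PySem.Dict String Int :=
      (PySem.List.slice topic_evolution (some mid_point) none).foldl
        (fun d topics => topics.foldl (fun d p => PySem.Dict.modify d p.1 0 (· + p.2)) d)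
        PySem.Dict.empty
    let declining : List String :=
      (PySem.Dict.keys first_half_topics).foldl
        (fun acc topic =>
          let first_count := PySem.Dict.getD first_half_topics topic 0
          let second_count := PySem.Dict.getD second_half_topics topic 0
          if first_count > second_count * 2 ∧ first_count > 2 then acc ++ [topic] else acc)
        []
    PySem.List.slice declining none (some 10)

-- ===== PORT B =====
-- sum(d.get(topic, 0) for d in half): a fold over the half's dicts (d.get = Dict.getD)
def pySumGet (ds : List (List (String × Int))) (t : String) : Int :=
  ds.foldl (fun a d => a + PySem.Dict.getD (PySem.Dict.mk d) t 0) 0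

-- the inner 'for topic in topics:' loop; the Bool flags the early 'return declining'
def bInner (first second : List (List (String × Int))) :
    List (String × Int) → PySem.Set String → List String → PySem.Set String × List String × Bool
  | [], seen, decl => (seen, decl, false)
  | p :: rest, seen, decl =>
    if PySem.Set.contains seen p.1 then bInner first second rest seen decl
    else
      let seen' := PySem.Set.add seen p.1
      let f := pySumGet first p.1
      let s := pySumGet second p.1
      if f > s * 2 ∧ f > 2 then
        let decl' := decl ++ [p.1]
        if decl'.length = 10 then (seen', decl', true)
        else bInner first second rest seen' decl'
      else bInner first second rest seen' decl

-- the outer 'for topics in first:' loop, stopping when the inner loop returned early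
def bOuter (first second : List (List (String × Int))) :
    List (List (String × Int)) → PySem.Set String → List String → List String
  | [], _, decl => decl
  | d :: rest, seen, decl =>
    let r := bInner first second d seen decl
    if r.2.2 then r.2.1 else bOuter first second rest r.1 r.2.1

def find_declining_topics_py_alt (topic_evolution : List (List (String × Int))) : List String :=
  if topic_evolution.length < 3 then []
  else
    let mid : Int := PySem.Int.floordiv topic_evolution.length 2
    let first := PySem.List.slice topic_evolution none (some mid)
    let second := PySem.List.slice topic_evolution (some mid) none
    bOuter first second first PySem.Set.empty []

-- ===== PRECONDITION & SPEC =====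
-- The inner lists model Python dicts, whose keys are always unique: an association list with a
-- duplicated key corresponds to no Python input, so Pre_ states exactly that representation invariant.
def Pre_find_declining_topics_py (topic_evolution : List (List (String × Int))) : Prop :=
  ∀ d ∈ topic_evolution, (d.map Prod.fst).Nodup
instance (topic_evolution : List (List (String × Int))) : Decidable (Pre_find_declining_topics_py topic_evolution) := by unfold Pre_find_declining_topics_py; infer_instance
def pvWitness_find_declining_topics_py : (List (List (String × Int))) := [[("a", 3)], [("b", 1)], []]
def Spec_find_declining_topics_py (topic_evolution : List (List (String × Int))) (out : List String) : Prop := out = find_declining_topics_py_alt topic_evolution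
instance (topic_evolution : List (List (String × Int))) (out : List String) : Decidable (Spec_find_declining_topics_py topic_evolution out) := by unfold Spec_find_declining_topics_py; infer_instance

-- ===== CLAIM (what is proved, stated in full; the proofs are below) =====
def Claim_equal_find_declining_topics_py : Prop := ∀ (topic_evolution : List (List (String × Int))), Dom_find_declining_topics_py topic_evolution → Pre_find_declining_topics_py topic_evolution → Spec_find_declining_topics_py topic_evolution (find_declining_topics_py topic_evolution)

-- ===== LEMMAS AND PROOFS =====

-- per-topic total count in a flat (key, count) list
def sumc (l : List (String × Int)) (v : String) : Int :=
  ((l.filter (fun p => p.1 == v)).map (fun p => p.2)).sum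

-- the deduped key sequence B actually visits (fresh keys relative to a seen set, in order)
def freshK (seen : PySem.Set String) : List (String × Int) → List String
  | [] => []
  | p :: r => if PySem.Set.contains seen p.1 then freshK seen r
              else p.1 :: freshK (PySem.Set.add seen p.1) r

-- a Counter updated with (key, count) pairs holds, at each key, the sum of that key's counts
theorem getD_foldl_modify_add (l : List (String × Int)) (d : PySem.Dict String Int) (v : String) :
    PySem.Dict.getD (l.foldl (fun d p => PySem.Dict.modify d p.1 0 (· + p.2)) d) v 0
      = PySem.Dict.getD d v 0 + sumc l v := by
  induction l generalizing d with
  | nil => simp [sumc]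
  | cons p l ih =>
      simp only [List.foldl_cons, ih, sumc, List.filter_cons]
      by_cases h : p.1 = v
      · simp [h, PySem.Dict.getD_modify_self]; ring
      · simp [h, PySem.Dict.getD_modify_of_ne _ _ _ (Ne.symm h)]

-- nested "for topics in …: for p in topics:" fold = fold over the flattened pair list
theorem foldl_foldl_eq_foldl_flatten {α β : Type} (ll : List (List α)) (f : β → α → β) (init : β) :
    ll.foldl (fun d topics => topics.foldl f d) init = ll.flatten.foldl f init := by
  induction ll generalizing init with
  | nil => rfl
  | cons t ll ih => simp [List.foldl_cons, ih]

-- if a topic never occurs in the pair list, its count sum is 0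
theorem sumc_eq_zero_of_not_mem (l : List (String × Int)) (v : String)
    (h : v ∉ l.map (fun p => p.1)) : sumc l v = 0 := by
  unfold sumc
  have : l.filter (fun p => p.1 == v) = [] := by
    apply List.filter_eq_nil_iff.mpr
    intro p hp
    simp only [beq_iff_eq]
    intro hpv
    exact h (List.mem_map.mpr ⟨p, hp, hpv⟩)
  simp [this]

theorem sumc_append (l1 l2 : List (String × Int)) (v : String) :
    sumc (l1 ++ l2) v = sumc l1 v + sumc l2 v := by
  simp [sumc, List.filter_append]

-- on an assoc list without duplicate keys, first-match lookup is the full count sum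
theorem getD_mk_eq_sumc (d : List (String × Int)) (t : String)
    (h : (d.map Prod.fst).Nodup) :
    PySem.Dict.getD (PySem.Dict.mk d) t 0 = sumc d t := by
  induction d with
  | nil => simp [sumc]; rfl
  | cons p r ih =>
      simp only [List.map_cons, List.nodup_cons] at h
      rw [PySem.Dict.getD_eq_get?_getD, PySem.Dict.get?_mk_cons]
      by_cases hpt : p.1 = t
      · subst hpt
        have hr0 : sumc r p.1 = 0 := by
          apply sumc_eq_zero_of_not_mem
          simpa using h.1
        simp only [sumc] at hr0
        simp [sumc, hr0]
      · have : (p.1 == t) = false := by simp [hpt]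
        rw [this]
        simp only [Bool.false_eq_true, if_false]
        rw [← PySem.Dict.getD_eq_get?_getD, ih h.2]
        simp [sumc, hpt]

-- B's per-topic generator sum over a half equals the flat count sum over that half
theorem foldl_getD_sumc (t : String) :
    ∀ (ds : List (List (String × Int))) (a : Int), (∀ d ∈ ds, (d.map Prod.fst).Nodup) →
      ds.foldl (fun a d => a + PySem.Dict.getD (PySem.Dict.mk d) t 0) a = a + sumc ds.flatten t := by
  intro ds
  induction ds with
  | nil => intro a _; simp [sumc]
  | cons d r ih =>
      intro a h
      simp only [List.foldl_cons, List.flatten_cons, sumc_append]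
      rw [ih _ (fun x hx => h x (by simp [hx]))]
      rw [getD_mk_eq_sumc d t (h d (by simp))]
      ring

theorem pySumGet_eq_sumc (ds : List (List (String × Int))) (t : String)
    (h : ∀ d ∈ ds, (d.map Prod.fst).Nodup) :
    pySumGet ds t = sumc ds.flatten t := by
  unfold pySumGet
  rw [foldl_getD_sumc t ds 0 h]
  ring

-- a seen-set updated with a pair list's keys appends exactly the fresh keys, in order
theorem update_eq_append_freshK (pairs : List (String × Int)) :
    ∀ (seen : PySem.Set String),
      PySem.Set.update seen (pairs.map Prod.fst) = seen ++ freshK seen pairs := by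
  induction pairs with
  | nil => intro seen; simp [PySem.Set.update, freshK]
  | cons p r ih =>
      intro seen
      simp only [List.map_cons, PySem.Set.update, List.foldl_cons, freshK]
      by_cases hc : PySem.Set.contains seen p.1 = true
      · have hadd : PySem.Set.add seen p.1 = seen :=
          PySem.Set.add_of_mem ((PySem.Set.contains_iff _ _).mp hc)
        rw [hadd]
        simp only [hc, if_true]
        have := ih seen
        simpa only [PySem.Set.update] using this
      · have hcf : PySem.Set.contains seen p.1 = false := by
          cases h' : PySem.Set.contains seen p.1
          · rfl
          · exact absurd h' hc
        have hadd : PySem.Set.add seen p.1 = seen ++ [p.1] :=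
          PySem.Set.add_of_not_mem (fun m => hc ((PySem.Set.contains_iff _ _).mpr m))
        simp only [hcf, Bool.false_eq_true, if_false]
        have := ih (PySem.Set.add seen p.1)
        simp only [PySem.Set.update] at this
        rw [this, hadd]
        simp

-- splitting bInner over a concatenation
theorem bInner_append (F S : List (List (String × Int))) (l1 l2 : List (String × Int)) :
    ∀ (seen : PySem.Set String) (decl : List String),
      bInner F S (l1 ++ l2) seen decl =
        (let r := bInner F S l1 seen decl;
         if r.2.2 then r else bInner F S l2 r.1 r.2.1) := by
  induction l1 with
  | nil => intro seen decl; simp [bInner]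
  | cons p r ih =>
      intro seen decl
      simp only [List.cons_append, bInner]
      by_cases hc : PySem.Set.contains seen p.1 = true
      · simp only [hc, if_true]; exact ih seen decl
      · have hcf : PySem.Set.contains seen p.1 = false := by
          cases h' : PySem.Set.contains seen p.1
          · rfl
          · exact absurd h' hc
        simp only [hcf, Bool.false_eq_true, if_false]
        by_cases hp : pySumGet F p.1 > pySumGet S p.1 * 2 ∧ pySumGet F p.1 > 2
        · rw [if_pos hp, if_pos hp]
          by_cases h10 : (decl ++ [p.1]).length = 10
          · rw [if_pos h10, if_pos h10]
            simp
          · rw [if_neg h10, if_neg h10]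
            exact ih _ _
        · rw [if_neg hp, if_neg hp]
          exact ih _ _

-- the outer dict loop is the inner loop over the flattened pair list
theorem bOuter_eq_bInner_flatten (F S : List (List (String × Int))) (ds : List (List (String × Int))) :
    ∀ (seen : PySem.Set String) (decl : List String),
      bOuter F S ds seen decl = (bInner F S ds.flatten seen decl).2.1 := by
  induction ds with
  | nil => intro seen decl; simp [bOuter, bInner]
  | cons d r ih =>
      intro seen decl
      simp only [bOuter, List.flatten_cons, bInner_append]
      by_cases hf : (bInner F S d seen decl).2.2
      · simp [hf]
      · simp only [hf]
        exact ih _ _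

-- the loop invariant: B's traversal produces decl ++ the next (10 - |decl|) fresh declining keys
theorem bInner_invariant (F S : List (List (String × Int))) (pairs : List (String × Int)) :
    ∀ (seen : PySem.Set String) (decl : List String), decl.length < 10 →
      (bInner F S pairs seen decl).2.1 =
        decl ++ List.take (10 - decl.length)
          ((freshK seen pairs).filter
            (fun t => decide (pySumGet F t > pySumGet S t * 2 ∧ pySumGet F t > 2))) := by
  induction pairs with
  | nil => intro seen decl _; simp [bInner, freshK]
  | cons p r ih =>
      intro seen decl hlen
      simp only [bInner, freshK]
      by_cases hc : PySem.Set.contains seen p.1 = true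
      · simp only [hc, if_true]
        exact ih seen decl hlen
      · have hcf : PySem.Set.contains seen p.1 = false := by
          cases h' : PySem.Set.contains seen p.1
          · rfl
          · exact absurd h' hc
        simp only [hcf, Bool.false_eq_true, if_false]
        rw [List.filter_cons]
        by_cases hp : pySumGet F p.1 > pySumGet S p.1 * 2 ∧ pySumGet F p.1 > 2
        · rw [if_pos hp, if_pos (decide_eq_true hp)]
          have htake : 10 - decl.length = (10 - (decl.length + 1)) + 1 := by omega
          by_cases h10 : (decl ++ [p.1]).length = 10
          · rw [if_pos h10]
            have h9 : decl.length = 9 := by simpa using h10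
            rw [htake, List.take_succ_cons]
            simp [h9]
          · rw [if_neg h10]
            have hlen' : (decl ++ [p.1]).length < 10 := by
              simp only [List.length_append, List.length_cons, List.length_nil] at h10 ⊢
              omega
            rw [ih _ _ hlen']
            rw [htake, List.take_succ_cons]
            simp
        · have hdf : decide (pySumGet F p.1 > pySumGet S p.1 * 2 ∧ pySumGet F p.1 > 2) = false := by
            simpa using hp
          rw [if_neg hp, hdf]
          simp only [Bool.false_eq_true, if_false]
          exact ih _ _ hlen

-- ===== VERDICT (by name: the statement is the Claim_ definition above) =====
theorem find_declining_topics_py_spec : Claim_equal_find_declining_topics_py := by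
  intro te _ hpre
  unfold Spec_find_declining_topics_py find_declining_topics_py find_declining_topics_py_alt
  by_cases h3 : te.length < 3
  · simp [h3]
  · simp only [h3, if_false]
    set mid : Int := PySem.Int.floordiv (te.length : Int) 2 with hmid
    have hmid_eq : mid = (te.length : Int) / 2 := by
      rw [hmid]; simp [PySem.Int.floordiv]
      rw [Int.fdiv_eq_ediv]
      norm_num
    have h0m : 0 ≤ mid := by rw [hmid_eq]; positivity
    set m : Nat := mid.toNat with hm
    have hcast : (m : Int) = mid := Int.toNat_of_nonneg h0m
    set F : List (List (String × Int)) := te.take m with hF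
    set S : List (List (String × Int)) := te.drop m with hS
    have hslice1 : PySem.List.slice te none (some mid) = F := by
      rw [← hcast, PySem.List.slice_to_natCast]
    have hslice2 : PySem.List.slice te (some mid) none = S := by
      rw [← hcast, PySem.List.slice_from_natCast]
    rw [hslice1, hslice2]
    -- A's counters over the halves, as flat count sums
    simp only [foldl_foldl_eq_foldl_flatten]
    rw [PySem.Dict.keys_foldl_modify_key F.flatten (fun (p : String × Int) => p.1) 0
      (fun _ p v => v + p.2), PySem.Dict.keys_empty]
    simp only [getD_foldl_modify_add, PySem.Dict.getD_empty, zero_add]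
    rw [PySem.List.foldl_append_ite_eq_filter]
    rw [PySem.List.slice_to _ (by norm_num : (0:Int) ≤ 10)]
    -- B's loops: flatten, apply the invariant, identify the visited key sequence
    rw [bOuter_eq_bInner_flatten, bInner_invariant F S F.flatten PySem.Set.empty []
      (by norm_num)]
    have hfresh : freshK PySem.Set.empty F.flatten
        = PySem.Set.update [] (F.flatten.map Prod.fst) := by
      rw [update_eq_append_freshK]
      simp [PySem.Set.empty]
    rw [hfresh]
    -- B's per-topic sums are the flat count sums (Pre_: unique keys in every dict)
    have hFsub : ∀ d ∈ F, (d.map Prod.fst).Nodup := fun d hd => hpre d (List.take_subset m te hd)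
    have hSsub : ∀ d ∈ S, (d.map Prod.fst).Nodup := fun d hd => hpre d (List.drop_subset m te hd)
    have hFsum : ∀ t, pySumGet F t = sumc F.flatten t := fun t => pySumGet_eq_sumc F t hFsub
    have hSsum : ∀ t, pySumGet S t = sumc S.flatten t := fun t => pySumGet_eq_sumc S t hSsub
    simp only [hFsum, hSsum]
    simp
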